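-- pv_equiv track=rewrite | github.com/WaitThatShouldntWork/vegeta | vegeta/inference/prediction_channels.py | _process_terms
-- ===== SOURCE A (Python) =====
-- from typing import Dict, List, Any, Optional, Tuple
--
-- def _process_terms(terms: List[str]) -> List[str]:
--     """Process and filter terms"""
--     processed = []
--
--     for term in terms:
--         # Convert to lowercase
--         term = term.lower()
--
--         # Skip very short terms
--         if len(term) < 3:
--             continue
--
--         # Skip duplicates
--         if term not in processed:
--             processed.append(term)
--
--     # Sort by some relevance score (for now, just alphabetically)
--     processed.sort()
--
--     return processed
-- ===== SOURCE B (Python) =====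
-- def _process_terms(terms):
--     """Process and filter terms: sort the cleaned terms first, then drop adjacent duplicates in one pass."""
--     cleaned = sorted(t.lower() for t in terms if len(t.lower()) >= 3)
--     out = []
--     for t in cleaned:
--         if not out or out[-1] != t:
--             out.append(t)
--     return out
-- ===== Notes on version B (the rewrite author's own statement) =====
-- stated objective: faster
-- what changed: Dedup via a membership test inside the loop is replaced by sorting the cleaned list first and removing adjacent duplicates in one linear pass.
import Mathlib
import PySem

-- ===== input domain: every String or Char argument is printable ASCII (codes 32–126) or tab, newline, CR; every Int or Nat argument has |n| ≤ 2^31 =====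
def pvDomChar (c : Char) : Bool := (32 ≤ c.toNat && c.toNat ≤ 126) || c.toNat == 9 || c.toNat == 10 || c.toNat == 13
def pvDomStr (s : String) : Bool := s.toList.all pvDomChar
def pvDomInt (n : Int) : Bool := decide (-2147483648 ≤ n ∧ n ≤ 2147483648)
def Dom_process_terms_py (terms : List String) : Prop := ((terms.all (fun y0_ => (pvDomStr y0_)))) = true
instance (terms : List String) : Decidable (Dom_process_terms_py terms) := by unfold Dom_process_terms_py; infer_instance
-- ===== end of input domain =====

set_option maxHeartbeats 1000000


-- B replaces A's O(n^2) in-loop membership dedup with sort-first + adjacent-duplicate removal (objective: faster).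

-- ===== PORT A =====
-- loop: lowercase, skip len<3, skip members already collected; then sort
def process_terms_py (terms : List String) : List String :=
  let processed := terms.foldl (fun acc term =>
    let term := PySem.Str.lower term
    if PySem.Str.len term < 3 then acc
    else if term ∈ acc then acc
    else acc ++ [term]) []
  PySem.List.sorted processed (fun x => x) false

-- ===== PORT B =====
-- sort the cleaned (lowercased, len≥3) list, then one pass dropping adjacent duplicates
def process_terms_py_alt (terms : List String) : List String :=
  let cleaned := PySem.List.sorted
    ((terms.map PySem.Str.lower).filter (fun t => decide (3 ≤ PySem.Str.len t)))
    (fun x => x) false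
  cleaned.foldl (fun out t => if out.getLast? = some t then out else out ++ [t]) []

-- ===== PRECONDITION & SPEC =====
def Spec_process_terms_py (terms : List String) (out : List String) : Prop := out = process_terms_py_alt terms
instance (terms : List String) (out : List String) : Decidable (Spec_process_terms_py terms out) := by unfold Spec_process_terms_py; infer_instance

-- ===== CLAIM (what is proved, stated in full; the proofs are below) =====
def Claim_equal_process_terms_py : Prop := ∀ (terms : List String), Dom_process_terms_py terms → Spec_process_terms_py terms (process_terms_py terms)

-- ===== LEMMAS AND PROOFS =====

-- A's loop, as a standalone fold step
def pvStepA (acc : List String) (term : String) : List String :=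
  let term := PySem.Str.lower term
  if PySem.Str.len term < 3 then acc
  else if term ∈ acc then acc
  else acc ++ [term]

def pvCleaned (terms : List String) : List String :=
  (terms.map PySem.Str.lower).filter (fun t => decide (3 ≤ PySem.Str.len t))

-- A's fold keeps a duplicate-free list with exactly the cleaned members
theorem pvFoldA_inv (terms : List String) (acc : List String) (hnd : acc.Nodup) :
    (terms.foldl pvStepA acc).Nodup ∧
    (∀ x, x ∈ terms.foldl pvStepA acc ↔ x ∈ acc ∨ x ∈ pvCleaned terms) := by
  induction terms generalizing acc with
  | nil => simpa [pvCleaned] using hnd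
  | cons t ts ih =>
    simp only [List.foldl_cons]
    have hstep : (pvStepA acc t).Nodup ∧
        (∀ x, x ∈ pvStepA acc t ↔ x ∈ acc ∨ (x = PySem.Str.lower t ∧ 3 ≤ PySem.Str.len (PySem.Str.lower t))) := by
      unfold pvStepA
      dsimp only
      split_ifs with h1 h2
      · constructor
        · exact hnd
        · intro x; constructor
          · exact fun hx => Or.inl hx
          · rintro (hx | ⟨rfl, hx⟩)
            · exact hx
            · omega
      · constructor
        · exact hnd
        · intro x; constructor
          · exact fun hx => Or.inl hx
          · rintro (hx | ⟨rfl, _⟩)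
            · exact hx
            · exact h2
      · constructor
        · have hna : ∀ a ∈ acc, ¬ a = PySem.Str.lower t := fun a ha h => h2 (h ▸ ha)
          simpa [List.nodup_append, hnd] using hna
        · intro x
          simp only [List.mem_append, List.mem_singleton]
          constructor
          · rintro (hx | rfl)
            · exact Or.inl hx
            · exact Or.inr ⟨rfl, by omega⟩
          · rintro (hx | ⟨rfl, _⟩)
            · exact Or.inl hx
            · exact Or.inr rfl
    obtain ⟨hnd', hmem'⟩ := hstep
    obtain ⟨hnd'', hmem''⟩ := ih (pvStepA acc t) hnd'
    refine ⟨hnd'', fun x => ?_⟩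
    rw [hmem'' x]
    have hCmem : ∀ y, y ∈ pvCleaned (t :: ts) ↔
        (y = PySem.Str.lower t ∧ 3 ≤ PySem.Str.len (PySem.Str.lower t)) ∨ y ∈ pvCleaned ts := by
      intro y
      simp only [pvCleaned, List.map_cons, List.mem_filter, List.mem_cons, decide_eq_true_eq]
      constructor
      · rintro ⟨rfl | hy, hp⟩
        · exact Or.inl ⟨rfl, hp⟩
        · exact Or.inr ⟨hy, hp⟩
      · rintro (⟨rfl, hp⟩ | ⟨hy, hp⟩)
        · exact ⟨Or.inl rfl, hp⟩
        · exact ⟨Or.inr hy, hp⟩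
    rw [hmem' x, hCmem x]
    exact or_assoc

-- every member of a (≤)-sorted list is at most its last element
theorem pv_le_getLast : ∀ (l : List String), l.Pairwise (· ≤ ·) → ∀ (hne : l ≠ []), ∀ a ∈ l, a ≤ l.getLast hne := by
  intro l
  induction l with
  | nil => intro _ hne; exact absurd rfl hne
  | cons x xs ih =>
    intro hpw hne a ha
    cases xs with
    | nil =>
      simp only [List.mem_singleton] at ha
      subst ha
      simp
    | cons y ys =>
      rw [List.getLast_cons (by simp)]
      rcases List.mem_cons.mp ha with rfl | ha'
      · exact List.rel_of_pairwise_cons hpw (List.getLast_mem (by simp))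
      · exact ih hpw.tail (by simp) a ha'

-- B's adjacent-dedup fold on a (≤)-sorted list: strictly increasing, same members
theorem pvFoldB_inv (l : List String) (acc : List String)
    (hacc : acc.Pairwise (· < ·))
    (hle : ∀ a ∈ acc, ∀ b ∈ l, a ≤ b)
    (hl : l.Pairwise (· ≤ ·)) :
    (l.foldl (fun out t => if out.getLast? = some t then out else out ++ [t]) acc).Pairwise (· < ·) ∧
    (∀ x, x ∈ l.foldl (fun out t => if out.getLast? = some t then out else out ++ [t]) acc ↔ x ∈ acc ∨ x ∈ l) := by
  induction l generalizing acc with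
  | nil => simpa using hacc
  | cons t ts ih =>
    simp only [List.foldl_cons]
    have hl' : ts.Pairwise (· ≤ ·) := hl.tail
    have hth : ∀ b ∈ ts, t ≤ b := by
      intro b hb; exact List.rel_of_pairwise_cons hl hb
    by_cases hlast : acc.getLast? = some t
    · rw [if_pos hlast]
      have htin : t ∈ acc := by
        rcases acc with _ | _
        · simp at hlast
        · exact List.mem_of_getLast? hlast
      have hle' : ∀ a ∈ acc, ∀ b ∈ ts, a ≤ b := by
        intro a ha b hb; exact le_trans (hle a ha t (by simp)) (hth b hb)
      obtain ⟨h1, h2⟩ := ih acc hacc hle' hl'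
      refine ⟨h1, fun x => ?_⟩
      rw [h2 x]
      constructor
      · rintro (hx | hx)
        · exact Or.inl hx
        · exact Or.inr (List.mem_cons_of_mem _ hx)
      · rintro (hx | hx)
        · exact Or.inl hx
        · rcases List.mem_cons.mp hx with rfl | hx
          · exact Or.inl htin
          · exact Or.inr hx
    · rw [if_neg hlast]
      have hstrict : ∀ a ∈ acc, a < t := by
        intro a ha
        rcases lt_or_eq_of_le (hle a ha t (by simp)) with h | rfl
        · exact h
        -- a = t ∈ acc: every element of acc is ≤ t, so t would be acc's last — contradiction
        · exfalso
          have hne : acc ≠ [] := List.ne_nil_of_mem ha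
          have h1 : acc.getLast hne ≤ a := hle _ (List.getLast_mem hne) a (by simp)
          have h2 : a ≤ acc.getLast hne := pv_le_getLast acc (hacc.imp le_of_lt) hne a ha
          have hsome := List.getLast?_eq_some_getLast (l := acc) hne
          rw [le_antisymm h1 h2] at hsome
          exact hlast hsome
      have hacc' : (acc ++ [t]).Pairwise (· < ·) := by
        rw [List.pairwise_append]
        exact ⟨hacc, by simp, by simpa using hstrict⟩
      have hle' : ∀ a ∈ acc ++ [t], ∀ b ∈ ts, a ≤ b := by
        intro a ha b hb
        rcases List.mem_append.mp ha with ha | ha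
        · exact le_trans (hle a ha t (by simp)) (hth b hb)
        · simp at ha; subst ha; exact hth b hb
      obtain ⟨h1, h2⟩ := ih (acc ++ [t]) hacc' hle' hl'
      refine ⟨h1, fun x => ?_⟩
      rw [h2 x]
      simp only [List.mem_append, List.mem_cons]
      tauto

-- ===== VERDICT (by name: the statement is the Claim_ definition above) =====
theorem process_terms_py_spec : Claim_equal_process_terms_py := by
  intro terms _
  unfold Spec_process_terms_py process_terms_py process_terms_py_alt
  obtain ⟨hndA, hmemA⟩ := pvFoldA_inv terms [] List.nodup_nil
  have hstepA : (fun acc term =>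
      let term := PySem.Str.lower term
      if PySem.Str.len term < 3 then acc
      else if term ∈ acc then acc
      else acc ++ [term]) = pvStepA := rfl
  rw [hstepA]
  set P := terms.foldl pvStepA [] with hP
  set C := pvCleaned terms with hC
  have hsortC : (PySem.List.sorted C (fun x => x) false).Pairwise (· ≤ ·) := by
    simpa using PySem.List.sorted_pairwise C (fun x => x)
  obtain ⟨hBpw, hBmem⟩ := pvFoldB_inv (PySem.List.sorted C (fun x => x) false) []
    List.Pairwise.nil (by simp) hsortC
  set R := (PySem.List.sorted C (fun x => x) false).foldl
    (fun out t => if out.getLast? = some t then out else out ++ [t]) [] with hR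
  have hBnd : R.Nodup := hBpw.imp ne_of_lt
  have hmemEq : ∀ x, x ∈ R ↔ x ∈ P := by
    intro x
    rw [hBmem x, hmemA x]
    simp [PySem.List.mem_sorted]
  have hperm : R.Perm P := (List.perm_ext_iff_of_nodup hBnd hndA).mpr hmemEq
  exact PySem.List.sorted_eq_of_perm_of_pairwise_lt P R (fun x => x) hperm hBpw
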